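-- pv_equiv track=rewrite | github.com/cosmicwhiz/dsa | Python DSA/General/DP/LongestAwesomeStr.py | awesomeStringAlt
-- ===== SOURCE A (Python) =====
-- from collections import Counter
--
-- def awesomeStringAlt(s):
--     # Time Limit Exceeded
--     maxLen = 0
--     for i in range(len(s)):
--         for j in range(i, len(s)):
--             temp = s[i:j+1]
--             c = Counter(temp)
--             oddVal = 0
--             for v in c.values():
--                 if v % 2 != 0:
--                     oddVal += 1
--                 if oddVal > 1:
--                     break
--             if oddVal == 1:
--                 maxLen = max(maxLen, sum(c.values()))
--     return maxLen
-- ===== SOURCE B (Python) =====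
-- def awesomeStringAlt(s):
--     # prefix parity sets: pref[k] = set of chars with odd count in s[:k];
--     # s[i:j+1] has exactly one odd-count char iff len(pref[i] ^ pref[j+1]) == 1
--     n = len(s)
--     pref = [frozenset()]
--     cur = set()
--     for ch in s:
--         if ch in cur:
--             cur.discard(ch)
--         else:
--             cur.add(ch)
--         pref.append(frozenset(cur))
--     maxLen = 0
--     for i in range(n):
--         for j in range(i, n):
--             if len(pref[i] ^ pref[j + 1]) == 1:
--                 maxLen = max(maxLen, j - i + 1)
--     return maxLen
-- ===== Notes on version B (the rewrite author's own statement) =====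
-- stated objective: faster
-- what changed: Instead of slicing every substring and recounting it with a Counter, B precomputes one prefix parity set per position (chars with odd count in s[:k]) and decides each pair (i,j) by the size of the symmetric difference pref[i]^pref[j+1], removing the per-pair substring scan.
import Mathlib
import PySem

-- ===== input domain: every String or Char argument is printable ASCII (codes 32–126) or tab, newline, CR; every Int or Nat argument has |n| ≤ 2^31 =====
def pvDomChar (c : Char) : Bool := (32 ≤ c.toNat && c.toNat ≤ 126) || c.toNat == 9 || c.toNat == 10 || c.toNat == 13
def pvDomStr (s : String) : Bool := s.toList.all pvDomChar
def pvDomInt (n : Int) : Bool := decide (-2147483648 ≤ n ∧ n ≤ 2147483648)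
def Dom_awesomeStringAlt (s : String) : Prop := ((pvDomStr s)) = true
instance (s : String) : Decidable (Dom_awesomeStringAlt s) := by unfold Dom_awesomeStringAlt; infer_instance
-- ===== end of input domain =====

-- B replaces A's per-substring Counter scan by precomputed prefix parity sets (faster; same return value).


-- ===== PORT A =====
-- the 'for v in c.values(): … break' loop of A, with its early exit
def oddLoopA : List Int → Int → Int
  | [], o => o
  | v :: rest, o =>
    let o' := if PySem.Int.mod v 2 ≠ 0 then o + 1 else o
    if o' > 1 then o' else oddLoopA rest o'


def awesomeStringAlt (s : String) : Int :=
  let l := s.toList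
  (PySem.List.pyRange 0 (l.length : Int) 1).foldl (fun maxLen i =>
    (PySem.List.pyRange i (l.length : Int) 1).foldl (fun maxLen j =>
      let temp := PySem.List.slice l (some i) (some (j + 1))
      let c := PySem.Dict.counter temp
      let oddVal := oddLoopA c.values 0
      if oddVal = 1 then max maxLen c.values.sum else maxLen) maxLen) 0

-- ===== PORT B =====
-- B's parity toggle: 'if ch in cur: cur.discard(ch) else: cur.add(ch)'
def toggleB (cur : PySem.Set Char) (ch : Char) : PySem.Set Char :=
  if PySem.Set.contains cur ch then PySem.Set.discard cur ch else PySem.Set.add cur ch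

def awesomeStringAlt_alt (s : String) : Int :=
  let l := s.toList
  let n : Int := l.length
  let pc := l.foldl
    (fun (pc : List (PySem.Set Char) × PySem.Set Char) ch =>
      let cur' := toggleB pc.2 ch
      (pc.1 ++ [cur'], cur'))
    ([PySem.Set.empty], PySem.Set.empty)
  let pref := pc.1
  (PySem.List.pyRange 0 n 1).foldl (fun maxLen i =>
    (PySem.List.pyRange i n 1).foldl (fun maxLen j =>
      if (PySem.Set.symmDiff (PySem.List.pyGetD pref i PySem.Set.empty)
            (PySem.List.pyGetD pref (j + 1) PySem.Set.empty)).length = 1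
      then max maxLen (j - i + 1) else maxLen) maxLen) 0

-- ===== PRECONDITION & SPEC =====
def Spec_awesomeStringAlt (s : String) (out : Int) : Prop := out = awesomeStringAlt_alt s
instance (s : String) (out : Int) : Decidable (Spec_awesomeStringAlt s out) := by unfold Spec_awesomeStringAlt; infer_instance

-- ===== CLAIM (what is proved, stated in full; the proofs are below) =====
def Claim_equal_awesomeStringAlt : Prop := ∀ (s : String), Dom_awesomeStringAlt s → Spec_awesomeStringAlt s (awesomeStringAlt s)

-- ===== LEMMAS AND PROOFS =====
def oddSetP (t : List Char) : PySem.Set Char := t.foldl toggleB PySem.Set.empty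

lemma nodup_foldl_toggle (t : List Char) : ∀ s : PySem.Set Char, s.Nodup → (t.foldl toggleB s).Nodup := by
  induction t with
  | nil => intro s h; exact h
  | cons x t ih =>
    intro s h
    refine ih _ ?_
    unfold toggleB
    split_ifs
    · exact PySem.Set.nodup_discard s x h
    · exact PySem.Set.nodup_add s x h

lemma mem_foldl_toggle (t : List Char) : ∀ (s : PySem.Set Char) (c : Char),
    (c ∈ t.foldl toggleB s ↔ ((c ∈ s) ↔ Even (t.count c))) := by
  induction t with
  | nil => intro s c; simp
  | cons x t ih =>
    intro s c
    rw [List.foldl_cons, ih]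
    by_cases hcx : c = x
    · subst hcx
      have hmem : c ∈ toggleB s c ↔ c ∉ s := by
        by_cases hs : c ∈ s
        · simp [toggleB, hs, PySem.Set.mem_discard]
        · simp [toggleB, hs]
      rw [hmem, List.count_cons_self, Nat.even_add_one]
      tauto
    · have hmem : c ∈ toggleB s x ↔ c ∈ s := by
        by_cases hs : x ∈ s
        · simp [toggleB, hs, PySem.Set.mem_discard, hcx]
        · simp [toggleB, hs, hcx]
      rw [hmem, List.count_cons_of_ne (Ne.symm hcx)]

lemma nodup_oddSetP (t : List Char) : (oddSetP t).Nodup :=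
  nodup_foldl_toggle t _ List.nodup_nil

lemma mem_oddSetP (t : List Char) (c : Char) : c ∈ oddSetP t ↔ Odd (t.count c) := by
  rw [oddSetP, mem_foldl_toggle]
  simp [PySem.Set.empty, false_iff, Nat.not_even_iff_odd]

lemma oddSetP_append_singleton (l : List Char) (ch : Char) :
    oddSetP (l ++ [ch]) = toggleB (oddSetP l) ch := by
  simp [oddSetP, List.foldl_append]

lemma pref_spec (l : List Char) :
    l.foldl (fun (pc : List (PySem.Set Char) × PySem.Set Char) ch =>
      let cur' := toggleB pc.2 ch
      (pc.1 ++ [cur'], cur')) ([PySem.Set.empty], PySem.Set.empty)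
    = ((List.range (l.length + 1)).map (fun k => oddSetP (l.take k)), oddSetP l) := by
  induction l using List.reverseRecOn with
  | nil => rfl
  | append_singleton l ch ih =>
    rw [List.foldl_append, ih]
    simp only [List.foldl_cons, List.foldl_nil]
    rw [oddSetP_append_singleton]
    refine Prod.ext ?_ rfl
    simp only [List.length_append, List.length_singleton]
    have hr : List.range (l.length + 1 + 1) = List.range (l.length + 1) ++ [l.length + 1] :=
      List.range_succ
    rw [hr, List.map_append]
    congr 1
    · apply List.map_congr_left
      intro k hk
      rw [List.mem_range] at hk
      rw [List.take_append_of_le_length (by omega)]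
    · rw [List.map_singleton, List.take_of_length_le (by simp), oddSetP_append_singleton]

lemma oddLoopA_eq_one (vals : List Int) : ∀ o : Int, 0 ≤ o → o ≤ 1 →
    (oddLoopA vals o = 1 ↔ o + (vals.countP (fun v => decide (PySem.Int.mod v 2 ≠ 0)) : Int) = 1) := by
  induction vals with
  | nil => intro o h0 h1; simp [oddLoopA]
  | cons v rest ih =>
    intro o h0 h1
    by_cases hv : PySem.Int.mod v 2 ≠ 0
    · have hcnt : (v :: rest).countP (fun v => decide (PySem.Int.mod v 2 ≠ 0))
          = rest.countP (fun v => decide (PySem.Int.mod v 2 ≠ 0)) + 1 := by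
        rw [List.countP_cons, decide_eq_true hv, if_pos rfl]
      have e1 : oddLoopA (v :: rest) o = if o + 1 > 1 then o + 1 else oddLoopA rest (o + 1) := by
        simp only [oddLoopA]; rw [if_pos hv]
      rw [e1, hcnt]
      by_cases ho : o + 1 > 1
      · rw [if_pos ho]; push_cast; omega
      · rw [if_neg ho, ih (o + 1) (by omega) (by omega)]; push_cast; omega
    · have hcnt : (v :: rest).countP (fun v => decide (PySem.Int.mod v 2 ≠ 0))
          = rest.countP (fun v => decide (PySem.Int.mod v 2 ≠ 0)) := by
        rw [List.countP_cons, decide_eq_false hv, if_neg Bool.false_ne_true, Nat.add_zero]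
      have e1 : oddLoopA (v :: rest) o = if o > 1 then o else oddLoopA rest o := by
        simp only [oddLoopA]; rw [if_neg hv]
      rw [e1, hcnt, if_neg (by omega : ¬ o > 1), ih o h0 h1]

lemma values_counter (temp : List Char) :
    (PySem.Dict.counter temp).values
      = (PySem.Set.ofList temp).map (fun k => (List.count k temp : Int)) := by
  show (PySem.Dict.counter temp).items.map (·.2) = _
  rw [PySem.Dict.items_counter, List.map_map]
  rfl

lemma odd_pred_eq (m : Nat) :
    (decide (PySem.Int.mod (m : Int) 2 ≠ 0)) = decide (Odd m) := by
  have h2 : (2 : Int) = ((2 : Nat) : Int) := by norm_num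
  rw [h2, PySem.Int.mod_natCast]
  simp [Nat.odd_iff]
  omega

lemma countP_values_counter (temp : List Char) :
    (PySem.Dict.counter temp).values.countP (fun v => decide (PySem.Int.mod v 2 ≠ 0))
      = List.countP (fun x => decide (Odd (List.count x temp))) (PySem.Set.ofList temp) := by
  rw [values_counter, List.countP_map]
  apply List.countP_congr
  intro x hx
  simp only [Function.comp_apply, odd_pred_eq]

lemma sum_values_counter (temp : List Char) :
    (PySem.Dict.counter temp).values.sum = (temp.length : Int) := by
  rw [values_counter]
  have hperm : (PySem.Set.ofList temp).Perm temp.dedup :=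
    (List.perm_ext_iff_of_nodup (PySem.Set.nodup_ofList temp) (List.nodup_dedup temp)).mpr
      (by intro a; rw [PySem.Set.mem_ofList, List.mem_dedup])
  rw [List.Perm.sum_eq (List.Perm.map _ hperm)]
  have : (temp.dedup.map (fun k => (List.count k temp : Int))).sum
      = ((temp.dedup.map (fun k => List.count k temp)).sum : Int) := by
    rw [Nat.cast_list_sum, List.map_map]
    rfl
  rw [this, List.sum_map_count_dedup_eq_length]

lemma length_symmDiff_eq (l : List Char) (a m : Nat) :
    ((oddSetP (l.take a)).symmDiff (oddSetP (l.take (a + m)))).length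
      = List.countP (fun x => decide (Odd (List.count x ((l.drop a).take m))))
          (PySem.Set.ofList ((l.drop a).take m)) := by
  set temp := (l.drop a).take m with htemp
  rw [List.countP_eq_length_filter]
  apply List.Perm.length_eq
  refine (List.perm_ext_iff_of_nodup
    (PySem.Set.nodup_symmDiff _ _ (nodup_oddSetP _) (nodup_oddSetP _))
    (List.Nodup.filter _ (PySem.Set.nodup_ofList temp))).mpr ?_
  intro x
  rw [PySem.Set.mem_symmDiff, List.mem_filter, PySem.Set.mem_ofList]
  have hsplit : List.count x (l.take (a + m)) = List.count x (l.take a) + List.count x temp := by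
    rw [List.take_add, List.count_append]
  have hmem : x ∈ temp ↔ 0 < List.count x temp := List.count_pos_iff.symm
  rw [mem_oddSetP, mem_oddSetP, hsplit, hmem]
  simp only [decide_eq_true_eq, Nat.odd_iff]
  omega

lemma pair_cond (l : List Char) (i j : Int) (h0 : 0 ≤ i) (hij : i ≤ j) (hjn : j < l.length) :
    (oddLoopA (PySem.Dict.counter (PySem.List.slice l (some i) (some (j + 1)))).values 0 = 1
      ↔ ((oddSetP (l.take i.toNat)).symmDiff (oddSetP (l.take (j.toNat + 1)))).length = 1)
    ∧ (PySem.Dict.counter (PySem.List.slice l (some i) (some (j + 1)))).values.sum = j - i + 1 := by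
  have hia : i = ((i.toNat : Nat) : Int) := by omega
  have hja : j + 1 = ((j.toNat + 1 : Nat) : Int) := by omega
  rw [hia, hja, PySem.List.slice_natCast]
  set a := i.toNat with ha
  set m := j.toNat + 1 - a with hm
  have ham : a + m = j.toNat + 1 := by omega
  have hlen : ((l.drop a).take m).length = m := by
    rw [List.length_take, List.length_drop]
    omega
  constructor
  · rw [oddLoopA_eq_one _ 0 le_rfl (by omega), countP_values_counter]
    have hl := length_symmDiff_eq l a m
    rw [ham] at hl
    simp only [Int.toNat_natCast]
    rw [hl]
    omega
  · rw [sum_values_counter, hlen]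
    omega


-- ===== VERDICT (by name: the statement is the Claim_ definition above) =====
theorem awesomeStringAlt_spec : Claim_equal_awesomeStringAlt := by
  intro s _
  unfold Spec_awesomeStringAlt awesomeStringAlt awesomeStringAlt_alt
  simp only [pref_spec]
  apply PySem.List.foldl_congr_mem
  intro acc i hi
  rw [PySem.List.mem_pyRange_one] at hi
  apply PySem.List.foldl_congr_mem
  intro acc2 j hj
  rw [PySem.List.mem_pyRange_one] at hj
  have hp := pair_cond s.toList i j hi.1 hj.1 hj.2
  have hja : j + 1 = ((j.toNat + 1 : Nat) : Int) := by omega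
  have hia : i = ((i.toNat : Nat) : Int) := by omega
  rw [hja, hia, PySem.List.pyGetD_natCast, PySem.List.pyGetD_natCast,
  PySem.List.getD_map_range _ _ _ _ (by omega), PySem.List.getD_map_range _ _ _ _ (by omega)]
  rw [← hja, ← hia]
  by_cases hc : oddLoopA (PySem.Dict.counter (PySem.List.slice s.toList (some i) (some (j + 1)))).values 0 = 1
  · rw [if_pos hc, if_pos (hp.1.mp hc), hp.2]
  · rw [if_neg hc, if_neg (fun h => hc (hp.1.mpr h))]
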